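-- pv_equiv track=rewrite | github.com/concept-action-dev/Day-1-Secret-Entrance | simple_parse_lr.py | process_values
-- ===== SOURCE A (Python) =====
-- from typing import Any, Dict, List, Optional
--
-- def process_values(records: List[Dict[str, Any]]) -> Dict[str, Any]:
--     """
--     Example "second loop" over the signed values.
--
--     Right now this:
--       - walks through the values in order
--       - keeps a running total (like moving left/right on a line)
--       - tracks farthest left and right positions reached
--
--     You can replace or extend this with whatever you need.
--     """
--     position = 0
--     max_right = 0
--     max_left = 0
--
--     for r in records:
--         position += r["value"]
--         if position > max_right:
--             max_right = position
--         if position < max_left: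
--             max_left = position
--
--     return {
--         "final_position": position,
--         "max_right": max_right,
--         "max_left": max_left,
--         "count": len(records),
--     }
-- ===== SOURCE B (Python) =====
-- from typing import Any, Dict, List, Optional
--
-- def process_values(records: List[Dict[str, Any]]) -> Dict[str, Any]:
--     # Build the table of cumulative positions first, then reduce it with
--     # separate max/min passes (instead of interleaving tracking in one loop).
--     prefix = []
--     total = 0
--     for r in records:
--         total += r["value"]
--         prefix.append(total)
--     return {
--         "final_position": prefix[-1] if prefix else 0,
--         "max_right": max(0, max(prefix, default=0)),
--         "max_left": min(0, min(prefix, default=0)),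
--         "count": len(records),
--     }
-- ===== Notes on version B (the rewrite author's own statement) =====
-- stated objective: idiomatic
-- what changed: B first materialises the cumulative-position (prefix-sum) table and then reduces it with separate max/min/last passes, instead of A's single loop that interleaves running max_right/max_left tracking with the sum.
import Mathlib
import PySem

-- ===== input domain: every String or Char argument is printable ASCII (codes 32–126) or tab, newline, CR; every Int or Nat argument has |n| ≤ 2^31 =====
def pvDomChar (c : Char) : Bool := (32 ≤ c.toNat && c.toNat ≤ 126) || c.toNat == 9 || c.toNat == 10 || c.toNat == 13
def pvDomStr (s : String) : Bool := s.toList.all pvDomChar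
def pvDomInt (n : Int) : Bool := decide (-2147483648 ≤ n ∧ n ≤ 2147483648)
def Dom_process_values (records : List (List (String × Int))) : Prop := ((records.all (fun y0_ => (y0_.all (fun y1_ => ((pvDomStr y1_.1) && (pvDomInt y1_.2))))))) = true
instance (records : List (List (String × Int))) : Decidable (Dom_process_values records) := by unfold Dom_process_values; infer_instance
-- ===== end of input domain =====

-- B builds the cumulative-position (prefix-sum) table first, then reduces it with
-- separate max/min/last passes; A interleaves the tracking in one loop. Same O(n) cost; objective: idiomatic.

-- ===== PORT A =====
-- A's loop: running position with interleaved max_right/max_left tracking.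
def pvALoop : List (List (String × Int)) → Int → Int → Int → Int × Int × Int
  | [], p, mr, ml => (p, mr, ml)
  | r :: rs, p, mr, ml =>
    let p' := p + (PySem.Dict.mk r).getD "value" 0
    pvALoop rs p' (if p' > mr then p' else mr) (if p' < ml then p' else ml)

def process_values (records : List (List (String × Int))) : List (String × Int) :=
  let s := pvALoop records 0 0 0
  [("final_position", s.1), ("max_right", s.2.1), ("max_left", s.2.2),
   ("count", (records.length : Int))]

-- ===== PORT B =====
-- prefix-sum table of the values (the 'prefix' list in Source B)
def pvPrefix : List (List (String × Int)) → Int → List Int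
  | [], _ => []
  | r :: rs, t =>
    let t' := t + (PySem.Dict.mk r).getD "value" 0
    t' :: pvPrefix rs t'

-- Python max(xs, default=0) / min(xs, default=0) on ints
def pvMaxD (xs : List Int) : Int := match xs with | [] => 0 | x :: ys => ys.foldl max x
def pvMinD (xs : List Int) : Int := match xs with | [] => 0 | x :: ys => ys.foldl min x

def process_values_alt (records : List (List (String × Int))) : List (String × Int) :=
  let table := pvPrefix records 0
  [("final_position", table.getLast?.getD 0),
   ("max_right", max 0 (pvMaxD table)),
   ("max_left", min 0 (pvMinD table)),
   ("count", (records.length : Int))]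

-- ===== PRECONDITION & SPEC =====
-- Pre_ excludes records missing the "value" key, on which A raises KeyError.
def Pre_process_values (records : List (List (String × Int))) : Prop :=
  records.all (fun r => (PySem.Dict.mk r).contains "value") = true
instance (records : List (List (String × Int))) : Decidable (Pre_process_values records) := by unfold Pre_process_values; infer_instance
def pvWitness_process_values : (List (List (String × Int))) := [[("value", 3)], [("value", -5)]]

def Spec_process_values (records : List (List (String × Int))) (out : List (String × Int)) : Prop := out = process_values_alt records
instance (records : List (List (String × Int))) (out : List (String × Int)) : Decidable (Spec_process_values records out) := by unfold Spec_process_values; infer_instance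

-- ===== CLAIM (what is proved, stated in full; the proofs are below) =====
def Claim_equal_process_values : Prop := ∀ (records : List (List (String × Int))), Dom_process_values records → Pre_process_values records → Spec_process_values records (process_values records)

-- ===== LEMMAS AND PROOFS =====

theorem foldl_max_comm (l : List Int) (a b : Int) :
    l.foldl max (max a b) = max a (l.foldl max b) := by
  induction l generalizing b with
  | nil => rfl
  | cons x xs ih =>
    simp only [List.foldl_cons]
    rw [max_assoc, ih]

theorem foldl_min_comm (l : List Int) (a b : Int) :
    l.foldl min (min a b) = min a (l.foldl min b) := by
  induction l generalizing b with
  | nil => rfl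
  | cons x xs ih =>
    simp only [List.foldl_cons]
    rw [min_assoc, ih]

theorem if_gt_eq_max (a b : Int) : (if b > a then b else a) = max a b := by
  rw [max_def]; omega

theorem if_lt_eq_min (a b : Int) : (if b < a then b else a) = min a b := by
  rw [min_def]; omega

-- characterise A's loop by the prefix-sum table
theorem pvALoop_eq (rs : List (List (String × Int))) :
    ∀ p mr ml, pvALoop rs p mr ml =
      ((pvPrefix rs p).getLast?.getD p,
       (pvPrefix rs p).foldl max mr,
       (pvPrefix rs p).foldl min ml) := by
  induction rs with
  | nil => intro p mr ml; rfl
  | cons r rest ih =>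
    intro p mr ml
    simp only [pvALoop, pvPrefix, ih, List.foldl_cons]
    rw [if_gt_eq_max, if_lt_eq_min]
    congr 1
    cases h : pvPrefix rest (p + (PySem.Dict.mk r).getD "value" 0) with
    | nil => simp
    | cons y ys => simp [List.getLast?_cons]

theorem prefix_max (P : List Int) : P.foldl max 0 = max 0 (pvMaxD P) := by
  cases P with
  | nil => simp [pvMaxD]
  | cons x xs =>
    simp only [pvMaxD, List.foldl_cons]
    exact foldl_max_comm xs 0 x

theorem prefix_min (P : List Int) : P.foldl min 0 = min 0 (pvMinD P) := by
  cases P with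
  | nil => simp [pvMinD]
  | cons x xs =>
    simp only [pvMinD, List.foldl_cons]
    exact foldl_min_comm xs 0 x

-- ===== VERDICT (by name: the statement is the Claim_ definition above) =====
theorem process_values_spec : Claim_equal_process_values := by
  intro records _ _
  show _ = _
  simp only [process_values, process_values_alt, pvALoop_eq, prefix_max, prefix_min]
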